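-- pv_equiv track=rewrite | github.com/sontung/location-based-generative | planner_rs.py | hash_sg
-- ===== SOURCE A (Python) =====
-- def hash_sg(relationships, ob_names):
--     """
--     hash into unique ID
--     :param relationships: [['brown', 'left', 'purple'] , ['yellow', 'up', 'yellow']]
--     :param ob_names:
--     :return:
--     """
--     a_key = [0]*len(ob_names)*len(ob_names)
--     pred2id = {"none": 0, "left": 1, "up": 2}
--     predefined_objects1 = ob_names[:]
--     predefined_objects2 = ob_names[:]
--     pair2pred = {}
--     for rel in relationships:
--         if rel[1] != "__in_image__":
--             pair2pred[(rel[0], rel[2])] = pred2id[rel[1]]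
--
--     idx = 0
--     for ob1 in predefined_objects1:
--         for ob2 in predefined_objects2:
--             if (ob1, ob2) in pair2pred:
--                 a_key[idx] = pair2pred[(ob1, ob2)]
--             idx += 1
--     return tuple(a_key)
-- ===== SOURCE B (Python) =====
-- def hash_sg(relationships, ob_names):
--     """Single pass over relationships: scatter each predicate into the n*n key
--     via a name->positions index, instead of scanning all n*n pairs."""
--     n = len(ob_names)
--     a_key = [0] * (n * n)
--     pred2id = {"none": 0, "left": 1, "up": 2}
--     pos = {}
--     for i, name in enumerate(ob_names):
--         pos.setdefault(name, []).append(i)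
--     for rel in relationships:
--         if rel[1] != "__in_image__":
--             p = pred2id[rel[1]]
--             for i in pos.get(rel[0], []):
--                 for j in pos.get(rel[2], []):
--                     a_key[i * n + j] = p
--     return tuple(a_key)
-- ===== Notes on version B (the rewrite author's own statement) =====
-- stated objective: alternative
-- what changed: Instead of building a pair->pred dict and scanning all n*n ordered name pairs, B builds a name->positions index once and makes a single pass over relationships, scattering each predicate id directly into the flat key at i*n+j.
import Mathlib
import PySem

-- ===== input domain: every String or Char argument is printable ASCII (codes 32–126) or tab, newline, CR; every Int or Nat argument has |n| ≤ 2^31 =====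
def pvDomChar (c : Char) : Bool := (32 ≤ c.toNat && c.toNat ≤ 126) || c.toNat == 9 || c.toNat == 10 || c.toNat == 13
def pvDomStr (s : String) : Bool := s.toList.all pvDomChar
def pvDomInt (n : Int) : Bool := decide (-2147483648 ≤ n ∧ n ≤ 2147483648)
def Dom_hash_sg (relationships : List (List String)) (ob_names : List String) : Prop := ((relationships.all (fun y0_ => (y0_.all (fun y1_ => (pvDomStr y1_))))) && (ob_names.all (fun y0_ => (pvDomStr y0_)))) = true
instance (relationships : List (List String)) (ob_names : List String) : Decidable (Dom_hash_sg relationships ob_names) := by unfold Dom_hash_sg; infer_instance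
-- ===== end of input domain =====

-- B replaces A's pair->pred dict plus full n*n pair scan by a name->positions index and a
-- single scatter pass over the relationships (alternative decomposition, similar cost).


-- ===== PORT A =====
-- rel[i] is ported as (pyGet? rel i).getD "" and pred2id[rel[1]] as (get? …).getD 0; the
-- defaults are unreachable under Pre_hash_sg, which excludes exactly the raising inputs.
def hash_sg (relationships : List (List String)) (ob_names : List String) : List Int :=
  let a_key : List Int := List.replicate (ob_names.length * ob_names.length) (0 : Int)
  let pred2id : PySem.Dict String Int :=
    ((PySem.Dict.empty.insert "none" 0).insert "left" 1).insert "up" 2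
  let predefined_objects1 := ob_names
  let predefined_objects2 := ob_names
  let pair2pred : PySem.Dict (String × String) Int :=
    relationships.foldl (fun d rel =>
      if ((PySem.List.pyGet? rel 1).getD "") ≠ "__in_image__" then
        d.insert ((PySem.List.pyGet? rel 0).getD "", (PySem.List.pyGet? rel 2).getD "")
          ((pred2id.get? ((PySem.List.pyGet? rel 1).getD "")).getD 0)
      else d) PySem.Dict.empty
  (predefined_objects1.foldl (fun (st : List Int × Nat) ob1 =>
    predefined_objects2.foldl (fun (st : List Int × Nat) ob2 =>
      ((if pair2pred.contains (ob1, ob2)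
        then st.1.set st.2 ((pair2pred.get? (ob1, ob2)).getD 0)
        else st.1), st.2 + 1)) st) (a_key, 0)).1

-- ===== PORT B =====
def hash_sg_alt (relationships : List (List String)) (ob_names : List String) : List Int :=
  let n := ob_names.length
  let a_key : List Int := List.replicate (n * n) (0 : Int)
  let pred2id : PySem.Dict String Int :=
    ((PySem.Dict.empty.insert "none" 0).insert "left" 1).insert "up" 2
  let pos : PySem.Dict String (List Int) :=
    (PySem.List.enumerate ob_names 0).foldl (fun d q => d.modify q.2 [] (· ++ [q.1])) PySem.Dict.empty
  relationships.foldl (fun a rel =>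
    if ((PySem.List.pyGet? rel 1).getD "") ≠ "__in_image__" then
      let p := (pred2id.get? ((PySem.List.pyGet? rel 1).getD "")).getD 0
      (pos.getD ((PySem.List.pyGet? rel 0).getD "") []).foldl (fun a i =>
        (pos.getD ((PySem.List.pyGet? rel 2).getD "") []).foldl (fun a j =>
          PySem.List.pySetD a (i * (n : Int) + j) p) a) a
    else a) a_key

-- ===== PRECONDITION & SPEC =====
-- Pre_ excludes exactly the inputs on which Python A raises: a relationship shorter than 2
-- (IndexError on rel[1]), and a non-"__in_image__" relationship shorter than 3 (IndexError
-- on rel[2]) or whose middle element is not a pred2id key (KeyError).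
def Pre_hash_sg (relationships : List (List String)) (ob_names : List String) : Prop :=
  ∀ rel ∈ relationships, 2 ≤ rel.length ∧
    (rel.getD 1 "" = "__in_image__" ∨
      (3 ≤ rel.length ∧ (rel.getD 1 "" = "none" ∨ rel.getD 1 "" = "left" ∨ rel.getD 1 "" = "up")))
instance (relationships : List (List String)) (ob_names : List String) : Decidable (Pre_hash_sg relationships ob_names) := by unfold Pre_hash_sg; infer_instance
def pvWitness_hash_sg : List (List String) × List String := ([["a", "left", "b"]], ["a", "b"])

def Spec_hash_sg (relationships : List (List String)) (ob_names : List String) (out : List Int) : Prop := out = hash_sg_alt relationships ob_names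
instance (relationships : List (List String)) (ob_names : List String) (out : List Int) : Decidable (Spec_hash_sg relationships ob_names out) := by unfold Spec_hash_sg; infer_instance

-- ===== CLAIM (what is proved, stated in full; the proofs are below) =====
def Claim_equal_hash_sg : Prop := ∀ (relationships : List (List String)) (ob_names : List String), Dom_hash_sg relationships ob_names → Pre_hash_sg relationships ob_names → Spec_hash_sg relationships ob_names (hash_sg relationships ob_names)

-- ===== LEMMAS AND PROOFS =====

-- Proof-side names for the shared sub-expressions of the two ports (definitional).
def pvPred2id : PySem.Dict String Int :=
  ((PySem.Dict.empty.insert "none" 0).insert "left" 1).insert "up" 2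

def pvPairD (relationships : List (List String)) : PySem.Dict (String × String) Int :=
  relationships.foldl (fun d rel =>
    if ((PySem.List.pyGet? rel 1).getD "") ≠ "__in_image__" then
      d.insert ((PySem.List.pyGet? rel 0).getD "", (PySem.List.pyGet? rel 2).getD "")
        ((pvPred2id.get? ((PySem.List.pyGet? rel 1).getD "")).getD 0)
    else d) PySem.Dict.empty

def pvPos (ob_names : List String) : PySem.Dict String (List Int) :=
  (PySem.List.enumerate ob_names 0).foldl (fun d q => d.modify q.2 [] (· ++ [q.1])) PySem.Dict.empty

-- A's inner row loop writes the row values over its zero segment.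
theorem pv_rowFold {α : Type} (c : α → Bool) (v : α → Int) :
    ∀ (l2 : List α) (pre suf : List Int),
      (l2.foldl (fun (st : List Int × Nat) ob2 =>
          ((if c ob2 then st.1.set st.2 (v ob2) else st.1), st.2 + 1))
        (pre ++ (List.replicate l2.length (0 : Int) ++ suf), pre.length))
      = (pre ++ (l2.map (fun ob2 => if c ob2 then v ob2 else 0) ++ suf), pre.length + l2.length) := by
  intro l2
  induction l2 with
  | nil => intro pre suf; simp
  | cons x t ih =>
    intro pre suf
    simp only [List.length_cons, List.replicate_succ, List.foldl_cons, List.map_cons,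
      List.cons_append]
    have hset : (pre ++ ((0 : Int) :: (List.replicate t.length 0 ++ suf))).set pre.length (v x)
        = pre ++ ((v x) :: (List.replicate t.length 0 ++ suf)) := by
      simp
    rcases hc : c x with _ | _
    · simp only [if_neg, Bool.false_eq_true, not_false_iff]
      have := ih (pre ++ [(0 : Int)]) suf
      simp only [List.append_assoc, List.singleton_append, List.length_append,
        List.length_singleton] at this ⊢
      rw [this]
      simp
      omega
    · simp only [ite_true, hset]
      have := ih (pre ++ [v x]) suf
      simp only [List.append_assoc, List.singleton_append, List.length_append,
        List.length_singleton] at this ⊢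
      rw [this]
      congr 1
      omega

-- A's whole nested loop produces the flatMap of the row values.
theorem pv_gridFold {α : Type} (c : α → α → Bool) (v : α → α → Int) (l2 : List α) :
    ∀ (l1 : List α) (pre : List Int),
      ((l1.foldl (fun (st : List Int × Nat) ob1 =>
          l2.foldl (fun (st : List Int × Nat) ob2 =>
            ((if c ob1 ob2 then st.1.set st.2 (v ob1 ob2) else st.1), st.2 + 1)) st)
        (pre ++ List.replicate (l1.length * l2.length) (0 : Int), pre.length)).1)
      = pre ++ l1.flatMap (fun ob1 => l2.map (fun ob2 => if c ob1 ob2 then v ob1 ob2 else 0)) := by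
  intro l1
  induction l1 with
  | nil => intro pre; simp
  | cons x t ih =>
    intro pre
    have hrep : List.replicate ((x :: t).length * l2.length) (0 : Int)
        = List.replicate l2.length 0 ++ List.replicate (t.length * l2.length) 0 := by
      rw [List.replicate_append_replicate]
      congr 1
      simp [Nat.succ_mul, Nat.add_comm]
    rw [hrep, List.foldl_cons, ← List.append_assoc]
    rw [List.append_assoc pre]
    rw [pv_rowFold (c x) (v x) l2 pre (List.replicate (t.length * l2.length) 0)]
    have hlen : pre.length + l2.length
        = (pre ++ List.map (fun ob2 => if c x ob2 then v x ob2 else 0) l2).length := by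
      simp
    rw [← List.append_assoc, hlen, ih]
    simp

-- A returns, pair for pair, the dict lookup with default 0.
theorem pv_A_char (relationships : List (List String)) (ob_names : List String) :
    hash_sg relationships ob_names
      = ob_names.flatMap (fun ob1 => ob_names.map (fun ob2 =>
          ((pvPairD relationships).get? (ob1, ob2)).getD 0)) := by
  have hval : ∀ (pr : String × String),
      (if (pvPairD relationships).contains pr then ((pvPairD relationships).get? pr).getD 0 else 0)
        = ((pvPairD relationships).get? pr).getD 0 := by
    intro pr
    rcases h : (pvPairD relationships).contains pr with _ | _
    · rw [if_neg (by simp)]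
      rw [(PySem.Dict.get?_eq_none_iff_contains _ _).2 h]
      rfl
    · simp
  have h := pv_gridFold (fun ob1 ob2 => (pvPairD relationships).contains (ob1, ob2))
      (fun ob1 ob2 => ((pvPairD relationships).get? (ob1, ob2)).getD 0) ob_names ob_names []
  simp only [List.nil_append, List.length_nil] at h
  simp only [hval] at h
  simp only [hash_sg]
  rw [← h]
  rfl

-- the positions index, as a lookup table
theorem pv_pos_getD (ob_names : List String) (name : String) :
    (pvPos ob_names).getD name []
      = (((PySem.List.enumerate ob_names 0).map (fun q => (q.2, q.1))).filter
          (fun q => q.1 == name)).map (fun q => q.2) := by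
  have h1 : pvPos ob_names
      = ((PySem.List.enumerate ob_names 0).map (fun q => (q.2, q.1))).foldl
          (fun d p => d.modify p.1 [] (· ++ [p.2])) PySem.Dict.empty := by
    rw [List.foldl_map]
    rfl
  rw [h1, PySem.Dict.getD_foldl_modify_append]
  simp

theorem pv_pos_mem (ob_names : List String) (name : String) (x : Int) :
    x ∈ (pvPos ob_names).getD name [] ↔
      ∃ (k : Nat) (hk : k < ob_names.length), x = (k : Int) ∧ ob_names[k] = name := by
  rw [pv_pos_getD]
  simp only [List.mem_map, List.mem_filter, PySem.List.mem_enumerate_iff, beq_iff_eq]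
  constructor
  · rintro ⟨q, ⟨⟨p, hp, hsw⟩, hnm⟩, rfl⟩
    obtain ⟨k, hk, rfl⟩ := hp
    subst hsw
    simp only at hnm ⊢
    exact ⟨k, hk, by omega, hnm⟩
  · rintro ⟨k, hk, rfl, hnm⟩
    refine ⟨(name, (k : Int)), ⟨⟨((0 : Int) + k, ob_names[k]), ⟨k, hk, rfl⟩, by simp [hnm]⟩, rfl⟩, rfl⟩

-- B's inner scatter loop, elementwise
theorem pv_scatIn (nI : Int) (p i : Int) :
    ∀ (P2 : List Int) (a : List Int), (∀ j ∈ P2, 0 ≤ i * nI + j) →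
      ∀ (k : Nat), k < a.length →
        ((P2.foldl (fun a j => PySem.List.pySetD a (i * nI + j) p) a).length = a.length ∧
         (P2.foldl (fun a j => PySem.List.pySetD a (i * nI + j) p) a)[k]? =
           if ∃ j ∈ P2, (k : Int) = i * nI + j then some p else a[k]?) := by
  intro P2
  induction P2 with
  | nil => intro a _ k hk; simp
  | cons j t ih =>
    intro a hnn k hk
    have hj0 : 0 ≤ i * nI + j := hnn j (by simp)
    have hset : PySem.List.pySetD a (i * nI + j) p = a.set (i * nI + j).toNat p :=
      PySem.List.pySetD_of_nonneg a p hj0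
    have hlen : (a.set (i * nI + j).toNat p).length = a.length := by simp
    have := ih (a.set (i * nI + j).toNat p) (fun j' hj' => hnn j' (by simp [hj'])) k (by omega)
    rw [List.foldl_cons, hset]
    refine ⟨by rw [this.1, hlen], ?_⟩
    rw [this.2]
    by_cases hrest : ∃ j' ∈ t, (k : Int) = i * nI + j'
    · rw [if_pos hrest, if_pos ⟨_, by simp [hrest.choose_spec.1], hrest.choose_spec.2⟩]
    · rw [if_neg hrest]
      rw [List.getElem?_set]
      by_cases hhd : (k : Int) = i * nI + j
      · have : (i * nI + j).toNat = k := by omega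
        rw [if_pos this, if_pos (show (i * nI + j).toNat < a.length by omega),
          if_pos (show ∃ j' ∈ (j :: t), (k : Int) = i * nI + j' from ⟨j, by simp, hhd⟩)]
      · have hne : (i * nI + j).toNat ≠ k := by omega
        rw [if_neg hne, if_neg (by rintro ⟨j', hj', hkk⟩; rcases List.mem_cons.1 hj' with rfl | hmem
                                   exacts [hhd hkk, hrest ⟨j', hmem, hkk⟩])]

-- B's outer scatter loop, elementwise
theorem pv_scatOut (nI : Int) (p : Int) (P2 : List Int) (h2 : ∀ j ∈ P2, 0 ≤ j) :
    ∀ (P1 : List Int) (a : List Int), (∀ i ∈ P1, 0 ≤ i ∧ 0 ≤ i * nI) →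
      ∀ (k : Nat), k < a.length →
        ((P1.foldl (fun a i => P2.foldl (fun a j => PySem.List.pySetD a (i * nI + j) p) a) a).length = a.length ∧
         (P1.foldl (fun a i => P2.foldl (fun a j => PySem.List.pySetD a (i * nI + j) p) a) a)[k]? =
           if ∃ i ∈ P1, ∃ j ∈ P2, (k : Int) = i * nI + j then some p else a[k]?) := by
  intro P1
  induction P1 with
  | nil => intro a _ k hk; simp
  | cons i t ih =>
    intro a hnn k hk
    have hi := hnn i (by simp)
    have hin := pv_scatIn nI p i P2 a (fun j hj => by have := h2 j hj; omega) k hk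
    rw [List.foldl_cons]
    have := ih (P2.foldl (fun a j => PySem.List.pySetD a (i * nI + j) p) a)
      (fun i' hi' => hnn i' (by simp [hi'])) k (by omega)
    refine ⟨by rw [this.1, hin.1], ?_⟩
    rw [this.2, hin.2]
    by_cases hrest : ∃ i' ∈ t, ∃ j ∈ P2, (k : Int) = i' * nI + j
    · rw [if_pos hrest, if_pos (by obtain ⟨i', hi', hj⟩ := hrest; exact ⟨i', by simp [hi'], hj⟩)]
    · rw [if_neg hrest]
      by_cases hhd : ∃ j ∈ P2, (k : Int) = i * nI + j
      · rw [if_pos hhd, if_pos ⟨i, by simp, hhd⟩]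
      · rw [if_neg hhd, if_neg (by rintro ⟨i', hi', hj⟩; rcases List.mem_cons.1 hi' with rfl | hmem
                                   exacts [hhd hj, hrest ⟨i', hmem, hj⟩])]

-- the scatter never changes the length
theorem pv_scatLenIn (nI p i : Int) :
    ∀ (P2 : List Int) (a : List Int),
      (P2.foldl (fun a j => PySem.List.pySetD a (i * nI + j) p) a).length = a.length := by
  intro P2
  induction P2 with
  | nil => intro a; rfl
  | cons j t ih => intro a; rw [List.foldl_cons, ih]; simp

theorem pv_scatLen (nI p : Int) (P2 : List Int) :
    ∀ (P1 : List Int) (a : List Int),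
      (P1.foldl (fun a i => P2.foldl (fun a j => PySem.List.pySetD a (i * nI + j) p) a) a).length = a.length := by
  intro P1
  induction P1 with
  | nil => intro a; rfl
  | cons i t ih => intro a; rw [List.foldl_cons, ih, pv_scatLenIn]

-- grid index injectivity over Int
theorem pv_grid_inj (n i0 j0 : Nat) (i j : Int) (_hi0 : i0 < n) (hj0 : j0 < n)
    (hi : 0 ≤ i) (hi' : i < (n : Int)) (hj : 0 ≤ j) (hj' : j < (n : Int)) :
    (((i0 * n + j0 : Nat) : Int) = i * (n : Int) + j) ↔ (i = (i0 : Int) ∧ j = (j0 : Int)) := by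
  constructor
  · intro h
    push_cast at h
    have hii : i = (i0 : Int) := by
      rcases lt_trichotomy i (i0 : Int) with hlt | heq | hgt
      · nlinarith
      · exact heq
      · nlinarith
    exact ⟨hii, by rw [hii] at h; linarith⟩
  · rintro ⟨rfl, rfl⟩
    push_cast
    ring

-- the parallel induction: B's cell (i,j) tracks A's dict entry for (ob_names[i], ob_names[j])
theorem pv_main (ob_names : List String) :
    ∀ (rels : List (List String)) (a : List Int) (d : PySem.Dict (String × String) Int),
      a.length = ob_names.length * ob_names.length →
      (∀ (i j : Nat) (hi : i < ob_names.length) (hj : j < ob_names.length),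
          a[i * ob_names.length + j]? = some ((d.get? (ob_names[i], ob_names[j])).getD 0)) →
      ((rels.foldl (fun a rel =>
          if ((PySem.List.pyGet? rel 1).getD "") ≠ "__in_image__" then
            ((pvPos ob_names).getD ((PySem.List.pyGet? rel 0).getD "") []).foldl (fun a i =>
              ((pvPos ob_names).getD ((PySem.List.pyGet? rel 2).getD "") []).foldl (fun a j =>
                PySem.List.pySetD a (i * (ob_names.length : Int) + j)
                  ((pvPred2id.get? ((PySem.List.pyGet? rel 1).getD "")).getD 0)) a) a
          else a) a).length = ob_names.length * ob_names.length ∧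
       ∀ (i j : Nat) (hi : i < ob_names.length) (hj : j < ob_names.length),
         (rels.foldl (fun a rel =>
          if ((PySem.List.pyGet? rel 1).getD "") ≠ "__in_image__" then
            ((pvPos ob_names).getD ((PySem.List.pyGet? rel 0).getD "") []).foldl (fun a i =>
              ((pvPos ob_names).getD ((PySem.List.pyGet? rel 2).getD "") []).foldl (fun a j =>
                PySem.List.pySetD a (i * (ob_names.length : Int) + j)
                  ((pvPred2id.get? ((PySem.List.pyGet? rel 1).getD "")).getD 0)) a) a
          else a) a)[i * ob_names.length + j]? =
           some (((rels.foldl (fun d rel =>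
              if ((PySem.List.pyGet? rel 1).getD "") ≠ "__in_image__" then
                d.insert ((PySem.List.pyGet? rel 0).getD "", (PySem.List.pyGet? rel 2).getD "")
                  ((pvPred2id.get? ((PySem.List.pyGet? rel 1).getD "")).getD 0)
              else d) d).get? (ob_names[i], ob_names[j])).getD 0)) := by
  intro rels
  induction rels with
  | nil => intro a d hlen hinv; exact ⟨hlen, fun i j hi hj => by simpa using hinv i j hi hj⟩
  | cons rel t ih =>
    intro a d hlen hinv
    simp only [List.foldl_cons]
    by_cases hc : ((PySem.List.pyGet? rel 1).getD "") ≠ "__in_image__"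
    · rw [if_pos hc, if_pos hc]
      set n := ob_names.length with hn
      set r0 := (PySem.List.pyGet? rel 0).getD "" with hr0
      set r2 := (PySem.List.pyGet? rel 2).getD "" with hr2
      set p := (pvPred2id.get? ((PySem.List.pyGet? rel 1).getD "")).getD 0 with hp
      have hb2 : ∀ j ∈ (pvPos ob_names).getD r2 [], 0 ≤ j := by
        intro j hj; obtain ⟨k, hk, rfl, _⟩ := (pv_pos_mem ob_names r2 j).1 hj; positivity
      have hb1 : ∀ i ∈ (pvPos ob_names).getD r0 [], 0 ≤ i ∧ 0 ≤ i * (n : Int) := by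
        intro i hi; obtain ⟨k, hk, rfl, _⟩ := (pv_pos_mem ob_names r0 i).1 hi
        constructor <;> positivity
      have hscat := pv_scatOut (n : Int) p ((pvPos ob_names).getD r2 []) hb2
        ((pvPos ob_names).getD r0 []) a hb1
      have hlen' : ((((pvPos ob_names).getD r0 []).foldl (fun a i =>
          (((pvPos ob_names).getD r2 []).foldl (fun a j =>
            PySem.List.pySetD a (i * (n : Int) + j) p) a)) a)).length = n * n := by
        rw [pv_scatLen]; exact hlen
      apply ih _ _ hlen'
      intro i j hi hj
      have hidx : i * n + j < a.length := by
        rw [hlen]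
        calc i * n + j < i * n + n := by omega
          _ = (i + 1) * n := by ring
          _ ≤ n * n := Nat.mul_le_mul_right n (by omega)
      rw [(hscat (i * n + j) hidx).2, hinv i j hi hj]
      rw [PySem.Dict.get?_insert]
      by_cases hmatch : ob_names[i] = r0 ∧ ob_names[j] = r2
      · rw [if_pos ?side1, if_pos (by simp [hmatch.1, hmatch.2])]
        · simp
        · exact ⟨(i : Int), (pv_pos_mem ob_names r0 _).2 ⟨i, hi, rfl, hmatch.1⟩,
            (j : Int), (pv_pos_mem ob_names r2 _).2 ⟨j, hj, rfl, hmatch.2⟩,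
            by push_cast; ring⟩
      · rw [if_neg ?side2, if_neg (by simp only [Prod.mk.injEq]; exact fun h => hmatch h)]
        rintro ⟨x, hx, y, hy, hxy⟩
        obtain ⟨ki, hki, rfl, hki'⟩ := (pv_pos_mem ob_names r0 x).1 hx
        obtain ⟨kj, hkj, rfl, hkj'⟩ := (pv_pos_mem ob_names r2 y).1 hy
        obtain ⟨hxi, hyj⟩ := (pv_grid_inj n i j _ _ hi hj (by positivity) (by exact_mod_cast hki)
          (by positivity) (by exact_mod_cast hkj)).1 hxy
        have hki2 : ki = i := by exact_mod_cast hxi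
        have hkj2 : kj = j := by exact_mod_cast hyj
        subst hki2; subst hkj2
        exact hmatch ⟨hki', hkj'⟩
    · rw [if_neg hc, if_neg hc]
      exact ih a d hlen hinv

-- the flatMap grid, elementwise
theorem pv_fm {α : Type} (l2 : List α) (g : α → α → Int) :
    ∀ (l1 : List α) (i j : Nat) (hi : i < l1.length) (hj : j < l2.length),
      (l1.flatMap (fun o1 => l2.map (g o1)))[i * l2.length + j]? = some (g l1[i] l2[j]) := by
  intro l1
  induction l1 with
  | nil => intro i j hi hj; simp at hi
  | cons x t ih =>
    intro i j hi hj
    rw [List.flatMap_cons]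
    cases i with
    | zero =>
      rw [List.getElem?_append, if_pos (by simpa using hj)]
      simp [hj]
    | succ i' =>
      have harith : (i' + 1) * l2.length + j = (l2.map (g x)).length + (i' * l2.length + j) := by
        simp; ring
      rw [harith, List.getElem?_append, if_neg (by omega)]
      have h2 : (l2.map (g x)).length + (i' * l2.length + j) - (l2.map (g x)).length
          = i' * l2.length + j := by omega
      rw [h2, ih i' j (by simpa using hi) hj]
      simp

theorem pv_fm_len {α : Type} (l2 : List α) (g : α → α → Int) (l1 : List α) :
    (l1.flatMap (fun o1 => l2.map (g o1))).length = l1.length * l2.length := by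
  induction l1 with
  | nil => simp
  | cons x t ih => simp [ih, Nat.succ_mul, Nat.add_comm]

-- ===== VERDICT (by name: the statement is the Claim_ definition above) =====
theorem hash_sg_spec : Claim_equal_hash_sg := by
  unfold Claim_equal_hash_sg
  intro rels obs _hdom _hpre
  unfold Spec_hash_sg
  set n := obs.length with hn
  have hB : hash_sg_alt rels obs
      = rels.foldl (fun a rel =>
          if ((PySem.List.pyGet? rel 1).getD "") ≠ "__in_image__" then
            ((pvPos obs).getD ((PySem.List.pyGet? rel 0).getD "") []).foldl (fun a i =>
              ((pvPos obs).getD ((PySem.List.pyGet? rel 2).getD "") []).foldl (fun a j =>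
                PySem.List.pySetD a (i * (n : Int) + j)
                  ((pvPred2id.get? ((PySem.List.pyGet? rel 1).getD "")).getD 0)) a) a
          else a) (List.replicate (n * n) (0 : Int)) := rfl
  have hbase : ∀ (i j : Nat) (hi : i < n) (hj : j < n),
      (List.replicate (n * n) (0 : Int))[i * n + j]?
        = some (((PySem.Dict.empty : PySem.Dict (String × String) Int).get?
            (obs[i], obs[j])).getD 0) := by
    intro i j hi hj
    have hidx : i * n + j < n * n := by
      calc i * n + j < i * n + n := by omega
        _ = (i + 1) * n := by ring
        _ ≤ n * n := Nat.mul_le_mul_right n (by omega)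
    rw [List.getElem?_replicate, if_pos hidx]
    rfl
  have hmain := pv_main obs rels (List.replicate (n * n) (0 : Int)) PySem.Dict.empty
    (by rw [hn]; simp) hbase
  rw [pv_A_char, hB]
  apply List.ext_getElem?
  intro k
  by_cases hk : k < n * n
  · have hnpos : 0 < n := by
      rcases Nat.eq_zero_or_pos n with h0 | h; · rw [h0] at hk; omega
      · exact h
    have hi : k / n < n := (Nat.div_lt_iff_lt_mul hnpos).2 hk
    have hj : k % n < n := Nat.mod_lt _ hnpos
    have hdecomp : k / n * n + k % n = k := by
      rw [Nat.mul_comm]; exact Nat.div_add_mod k n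
    rw [← hdecomp]
    rw [pv_fm obs (fun o1 o2 => ((pvPairD rels).get? (o1, o2)).getD 0) obs (k / n) (k % n) hi hj]
    exact (hmain.2 (k / n) (k % n) hi hj).symm
  · rw [List.getElem?_eq_none (by rw [pv_fm_len, ← hn]; omega),
      List.getElem?_eq_none (by rw [hmain.1, ← hn]; omega)]
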